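-- pv_equiv track=rewrite | github.com/gkd666/shisanshui | AI.py | puke7
-- ===== SOURCE A (Python) =====
-- def puke7(puke):
--     for i in puke:
--         x = i[0]
--         break
--     for i in puke:
--         if (i[0] != x):
--             return 0
--     return 1
-- ===== SOURCE B (Python) =====
-- def puke7(puke):
--     firsts = {i[0] for i in puke}
--     return 1 if len(firsts) <= 1 else 0
-- ===== Notes on version B (the rewrite author's own statement) =====
-- stated objective: idiomatic
-- what changed: B builds the set of distinct first elements in one comprehension and checks its size, instead of A's pick-a-reference-then-rescan pair of loops with an early return; Pre_ excludes inputs with an empty inner list, where B always raises IndexError while A may return 0 by an early mismatch before reaching it.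
-- outside the precondition, e.g. on puke7([(1,), (-3, -1), (), (1, 3)]): A returns 0, B raises IndexError
import Mathlib
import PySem

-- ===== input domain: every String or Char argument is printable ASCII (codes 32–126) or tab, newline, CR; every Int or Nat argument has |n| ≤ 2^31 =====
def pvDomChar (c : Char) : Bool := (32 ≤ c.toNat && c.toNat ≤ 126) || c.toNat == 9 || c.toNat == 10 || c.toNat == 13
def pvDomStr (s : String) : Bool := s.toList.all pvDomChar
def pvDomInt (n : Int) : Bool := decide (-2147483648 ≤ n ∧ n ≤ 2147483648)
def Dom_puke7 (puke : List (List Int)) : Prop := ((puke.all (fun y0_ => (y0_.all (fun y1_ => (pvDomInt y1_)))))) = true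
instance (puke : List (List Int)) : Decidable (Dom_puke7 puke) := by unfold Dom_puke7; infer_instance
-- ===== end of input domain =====

-- B replaces A's reference-value-then-rescan loops with one set comprehension of the first elements and a size check (idiomatic).


-- ===== PORT A =====
-- second 'for' loop of A: return 0 on the first mismatching first element, else 1
def puke7Loop (x : Int) : List (List Int) → Int
  | [] => 1
  | i :: rest =>
    if (PySem.List.pyGet? i 0).getD 0 ≠ x then 0 else puke7Loop x rest

def puke7 (puke : List (List Int)) : Int :=
  match puke with
  | [] => 1                                  -- first loop never runs; second loop empty; return 1
  | i :: _ => puke7Loop ((PySem.List.pyGet? i 0).getD 0) puke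
    -- x = i[0] then break; '.getD 0' totalizes the IndexError case, which Pre_puke7 excludes

-- ===== PORT B =====
def puke7_alt (puke : List (List Int)) : Int :=
  let firsts : PySem.Set Int := PySem.Set.ofList (puke.map (fun i => (PySem.List.pyGet? i 0).getD 0))
  if firsts.length ≤ 1 then 1 else 0

-- ===== PRECONDITION & SPEC =====
-- Pre_ excludes inputs containing an empty inner list: B always raises IndexError on i[0] there, while A either raises too or returns 0 by an early mismatch before reaching the empty list.
def Pre_puke7 (puke : List (List Int)) : Prop := ∀ i ∈ puke, i ≠ []
instance (puke : List (List Int)) : Decidable (Pre_puke7 puke) := by unfold Pre_puke7; infer_instance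
def pvWitness_puke7 : List (List Int) := [[1, 2], [1]]

def Spec_puke7 (puke : List (List Int)) (out : Int) : Prop := out = puke7_alt puke
instance (puke : List (List Int)) (out : Int) : Decidable (Spec_puke7 puke out) := by unfold Spec_puke7; infer_instance

-- ===== CLAIM (what is proved, stated in full; the proofs are below) =====
def Claim_equal_puke7 : Prop := ∀ (puke : List (List Int)), Dom_puke7 puke → Pre_puke7 puke → Spec_puke7 puke (puke7 puke)

-- ===== LEMMAS AND PROOFS =====

-- A's second loop returns 1 exactly when every first element equals x
theorem puke7Loop_eq_one (x : Int) (l : List (List Int)) :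
    puke7Loop x l = (if ∀ i ∈ l, (PySem.List.pyGet? i 0).getD 0 = x then 1 else 0) := by
  induction l with
  | nil => simp [puke7Loop]
  | cons i rest ih =>
    simp only [puke7Loop, ih]
    by_cases h : (PySem.List.pyGet? i 0).getD 0 = x <;> simp [h]

-- if every element of l equals x, folding Set.add over l from [x] stays [x]
theorem ofList_const (x : Int) (l : List Int) (h : ∀ y ∈ l, y = x) :
    List.foldl PySem.Set.add [x] l = [x] := by
  induction l with
  | nil => rfl
  | cons y rest ih =>
    have hy := h y (by simp)
    subst hy
    simp only [List.foldl_cons]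
    have : PySem.Set.add [y] y = [y] := by simp [PySem.Set.add, PySem.Set.contains]
    rw [this]
    exact ih (fun z hz => h z (by simp [hz]))

-- the set of x :: l is a singleton iff every element of l equals x
theorem ofList_len_le_one_iff (x : Int) (l : List Int) :
    (PySem.Set.ofList (x :: l)).length ≤ 1 ↔ ∀ y ∈ l, y = x := by
  constructor
  · intro hlen y hy
    by_contra hne
    have hx : x ∈ PySem.Set.ofList (x :: l) := by rw [PySem.Set.mem_ofList]; simp
    have hyn : y ∈ PySem.Set.ofList (x :: l) := by rw [PySem.Set.mem_ofList]; simp [hy]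
    rcases hset : PySem.Set.ofList (x :: l) with _ | ⟨a, _ | ⟨b, r⟩⟩
    · rw [hset] at hx; simp at hx
    · rw [hset] at hx hyn; simp at hx hyn; exact hne (by rw [hx, hyn])
    · rw [hset] at hlen; simp at hlen
  · intro h
    have h2 : PySem.Set.ofList (x :: l) = List.foldl PySem.Set.add [x] l := by
      simp [PySem.Set.ofList_eq_foldl, PySem.Set.add, PySem.Set.contains]
    rw [h2, ofList_const x l h]
    simp

-- ===== VERDICT (by name: the statement is the Claim_ definition above) =====
theorem puke7_spec : Claim_equal_puke7 := by
  intro puke _hdom _hpre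
  unfold Spec_puke7 puke7 puke7_alt
  match puke with
  | [] => rfl
  | i :: rest =>
    simp only [List.map_cons]
    rw [puke7Loop_eq_one]
    have key : (∀ j ∈ i :: rest, (PySem.List.pyGet? j 0).getD 0 = (PySem.List.pyGet? i 0).getD 0) ↔
        (PySem.Set.ofList ((PySem.List.pyGet? i 0).getD 0 :: rest.map (fun j => (PySem.List.pyGet? j 0).getD 0))).length ≤ 1 := by
      rw [ofList_len_le_one_iff]; simp
    simp only [key]
    rfl
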